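-- pv_equiv track=rewrite | github.com/x12390/dnd_gamemaster_console_2 | character.py | get_attribute_modificator
-- ===== SOURCE A (Python) =====
-- def get_attribute_modificator(attribute_value):
--     """
--     Methode, die den Attributmodifikator für ein gegebenen Attributswert zurueckgibt.
--     :param attribute_value: Attributwert des Charakters
--     :return: Attributmodifikator
--     """
--     ret = -1
--
--     modlist = [[1, -5], [2, -4], [3, -4], [4, -3], [5, -3], [6, -2], [7, -2], [8, -1], [9, -1], [10, 0],
--                [11, 0], [12, 1], [13, 1], [14, 2], [15, 2], [16, 3], [17, 3], [18, 4], [19, 4], [20, 5],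
--                [21, 5], [22, 6], [23, 6], [24, 7], [25, 7], [26, 8], [27, 8], [28, 9], [29, 9], [30, 10]
--               ]
--
--     for i in modlist:
--         list_attribute_value = i[0]
--         if list_attribute_value == attribute_value:
--             ret = i[1]
--     return ret
-- ===== SOURCE B (Python) =====
-- import math
--
-- def get_attribute_modificator(attribute_value):
--     """Closed-form D&D modifier: floor((v-10)/2) for 1..30, else -1."""
--     if attribute_value in range(1, 31):
--         return math.floor((attribute_value - 10) / 2)
--     return -1
-- ===== Notes on version B (the rewrite author's own statement) =====
-- stated objective: simpler
-- what changed: Replaces the 30-entry table scan with a range guard plus the closed-form formula floor((v-10)/2); no list is built and no loop runs.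
import Mathlib
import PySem

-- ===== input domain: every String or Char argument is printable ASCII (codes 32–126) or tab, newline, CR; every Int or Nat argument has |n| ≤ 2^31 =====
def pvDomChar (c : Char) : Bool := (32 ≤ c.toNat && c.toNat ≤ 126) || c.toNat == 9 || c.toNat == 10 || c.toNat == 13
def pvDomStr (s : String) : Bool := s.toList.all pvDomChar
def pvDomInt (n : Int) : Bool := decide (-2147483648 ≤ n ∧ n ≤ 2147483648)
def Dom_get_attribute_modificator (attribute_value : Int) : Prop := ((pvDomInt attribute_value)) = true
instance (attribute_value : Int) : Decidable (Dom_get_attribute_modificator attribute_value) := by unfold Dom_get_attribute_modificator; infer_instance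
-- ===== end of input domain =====

-- B replaces A's 30-entry table scan with a range guard plus the closed-form floor((v-10)/2) (objective: simpler).

-- ===== PORT A =====
-- the literal table from A
def pvModlist : List (Int × Int) :=
  [(1, -5), (2, -4), (3, -4), (4, -3), (5, -3), (6, -2), (7, -2), (8, -1), (9, -1), (10, 0),
   (11, 0), (12, 1), (13, 1), (14, 2), (15, 2), (16, 3), (17, 3), (18, 4), (19, 4), (20, 5),
   (21, 5), (22, 6), (23, 6), (24, 7), (25, 7), (26, 8), (27, 8), (28, 9), (29, 9), (30, 10)]

def get_attribute_modificator (attribute_value : Int) : Int :=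
  pvModlist.foldl (fun ret i => if i.1 = attribute_value then i.2 else ret) (-1)

-- ===== PORT B =====
def get_attribute_modificator_alt (attribute_value : Int) : Int :=
  if 1 ≤ attribute_value ∧ attribute_value ≤ 30 then
    PySem.Int.floordiv (attribute_value - 10) 2
  else -1

-- ===== PRECONDITION & SPEC =====
def Spec_get_attribute_modificator (attribute_value : Int) (out : Int) : Prop := out = get_attribute_modificator_alt attribute_value
instance (attribute_value : Int) (out : Int) : Decidable (Spec_get_attribute_modificator attribute_value out) := by unfold Spec_get_attribute_modificator; infer_instance

-- ===== CLAIM (what is proved, stated in full; the proofs are below) =====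
def Claim_equal_get_attribute_modificator : Prop := ∀ (attribute_value : Int), Dom_get_attribute_modificator attribute_value → Spec_get_attribute_modificator attribute_value (get_attribute_modificator attribute_value)

-- ===== LEMMAS AND PROOFS =====
theorem pv_foldl_none (v r : Int) (l : List (Int × Int)) (h : ∀ p ∈ l, p.1 ≠ v) :
    l.foldl (fun ret i => if i.1 = v then i.2 else ret) r = r := by
  induction l generalizing r with
  | nil => rfl
  | cons a t ih =>
      simp only [List.foldl_cons, if_neg (h a (by simp))]
      exact ih r (fun p hp => h p (by simp [hp]))

-- ===== VERDICT (by name: the statement is the Claim_ definition above) =====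
theorem get_attribute_modificator_spec : Claim_equal_get_attribute_modificator := by
  intro v _
  unfold Spec_get_attribute_modificator get_attribute_modificator get_attribute_modificator_alt pvModlist
  by_cases h : 1 ≤ v ∧ v ≤ 30
  · obtain ⟨h1, h2⟩ := h
    interval_cases v <;> decide
  · rw [if_neg h, pv_foldl_none]
    intro p hp
    fin_cases hp <;> omega
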